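-- pv_equiv track=rewrite | github.com/mattgonzalesced/CED_Extensions | AE PyDev.extension/AE pyTools.Tab/Test Buttons.Panel/Let there be YAML.pulldown/Update Vector.pushbutton/script.py | _group_tag_entries
-- ===== SOURCE A (Python) =====
-- def _normalize_text(value):
--     if not value:
--         return ""
--     return " ".join(str(value).strip().lower().split())
--
-- def _tag_entry_key(entry):
--     if not isinstance(entry, dict):
--         return None
--     return _normalize_text(entry.get("type_name") or entry.get("type"))
--
-- def _group_tag_entries(tag_entries):
--     grouped = {}
--     for entry in tag_entries or []:
--         key = _tag_entry_key(entry)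
--         if not key:
--             continue
--         grouped.setdefault(key, []).append(entry)
--     return grouped
-- ===== SOURCE B (Python) =====
-- def _normalize_text(value):
--     if not value:
--         return ""
--     return " ".join(str(value).strip().lower().split())
--
-- def _tag_entry_key(entry):
--     if not isinstance(entry, dict):
--         return None
--     return _normalize_text(entry.get("type_name") or entry.get("type"))
--
-- def _group_tag_entries(tag_entries):
--     pairs = []
--     for entry in tag_entries or []:
--         key = _tag_entry_key(entry)
--         if key:
--             pairs.append((key, entry))
--     keys = list(dict.fromkeys(k for k, _ in pairs))
--     return {k: [e for k2, e in pairs if k2 == k] for k in keys}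
-- ===== Notes on version B (the rewrite author's own statement) =====
-- stated objective: alternative
-- what changed: Replaces the single-pass setdefault/append hash-dict grouping with building a filtered (key, entry) pair list, deduplicating keys in first-seen order, then collecting each group by a per-key scan of the pair list.
import Mathlib
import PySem

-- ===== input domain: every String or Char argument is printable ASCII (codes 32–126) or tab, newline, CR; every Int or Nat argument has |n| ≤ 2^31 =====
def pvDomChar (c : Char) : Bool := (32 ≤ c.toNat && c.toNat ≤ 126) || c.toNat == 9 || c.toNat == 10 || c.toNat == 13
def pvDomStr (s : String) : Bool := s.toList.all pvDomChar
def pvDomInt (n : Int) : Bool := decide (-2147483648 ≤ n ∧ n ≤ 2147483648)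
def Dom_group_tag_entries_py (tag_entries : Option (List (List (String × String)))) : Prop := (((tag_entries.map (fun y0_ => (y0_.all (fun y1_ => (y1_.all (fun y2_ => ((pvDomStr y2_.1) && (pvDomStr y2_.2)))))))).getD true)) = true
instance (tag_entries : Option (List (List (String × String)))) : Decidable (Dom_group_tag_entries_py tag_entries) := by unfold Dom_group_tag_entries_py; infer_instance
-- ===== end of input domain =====

-- B replaces A's incremental hash-dict grouping by a pair-list + first-seen key dedup + per-key scan (alternative decomposition, same results).


-- ===== PORT A =====
-- helper _normalize_text (value is None or a str here; str(value) is the identity on str)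
def normalize_text_py (value : Option String) : String :=
  match value with
  | none => ""
  | some s =>
      if s = "" then ""
      else PySem.Str.join " " (PySem.Str.split₀ (PySem.Str.lower (PySem.Str.strip s)))

-- helper _tag_entry_key (isinstance(entry, dict) is always true under the type convention)
def tag_entry_key_py (entry : List (String × String)) : String :=
  let d := PySem.Dict.mk entry
  normalize_text_py
    (match d.get? "type_name" with
     | some s => if s = "" then d.get? "type" else some s
     | none => d.get? "type")

-- grouped.setdefault(key, []).append(entry) is exactly Dict.modify key [] (· ++ [entry])
def group_tag_entries_py (tag_entries : Option (List (List (String × String)))) : List (String × List (List (String × String))) :=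
  ((tag_entries.getD []).foldl
      (fun (grouped : PySem.Dict String (List (List (String × String)))) entry =>
        let key := tag_entry_key_py entry
        if key = "" then grouped
        else grouped.modify key [] (· ++ [entry]))
      PySem.Dict.empty).items

-- ===== PORT B =====
def group_tag_entries_py_alt (tag_entries : Option (List (List (String × String)))) : List (String × List (List (String × String))) :=
  let pairs := (tag_entries.getD []).foldl
      (fun acc entry =>
        let key := tag_entry_key_py entry
        if key = "" then acc else acc ++ [(key, entry)])
      []
  let keys := PySem.List.dedup (pairs.map (·.1))
  keys.map (fun k => (k, (pairs.filter (fun p => p.1 == k)).map (·.2)))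

-- ===== PRECONDITION & SPEC =====
def Spec_group_tag_entries_py (tag_entries : Option (List (List (String × String)))) (out : List (String × List (List (String × String)))) : Prop := out = group_tag_entries_py_alt tag_entries
instance (tag_entries : Option (List (List (String × String)))) (out : List (String × List (List (String × String)))) : Decidable (Spec_group_tag_entries_py tag_entries out) := by unfold Spec_group_tag_entries_py; infer_instance

-- ===== CLAIM (what is proved, stated in full; the proofs are below) =====
def Claim_equal_group_tag_entries_py : Prop := ∀ (tag_entries : Option (List (List (String × String)))), Dom_group_tag_entries_py tag_entries → Spec_group_tag_entries_py tag_entries (group_tag_entries_py tag_entries)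

-- ===== LEMMAS AND PROOFS =====

-- B's pair list is a filter-map of the entries
theorem pairs_eq_filter_map (l : List (List (String × String)))
    (acc : List (String × List (String × String))) :
    l.foldl
      (fun acc entry =>
        let key := tag_entry_key_py entry
        if key = "" then acc else acc ++ [(key, entry)])
      acc
    = acc ++ (l.filter (fun e => !(decide (tag_entry_key_py e = "")))).map
        (fun e => (tag_entry_key_py e, e)) := by
  induction l generalizing acc with
  | nil => simp
  | cons e t ih =>
      simp only [List.foldl_cons, List.filter_cons]
      by_cases h : tag_entry_key_py e = ""
      · simp [h, ih]
      · simp [h, ih]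

-- A's loop is the Dict.modify fold over that same filter-map
theorem foldA_eq_pair_fold (l : List (List (String × String)))
    (d : PySem.Dict String (List (List (String × String)))) :
    l.foldl
      (fun (grouped : PySem.Dict String (List (List (String × String)))) entry =>
        let key := tag_entry_key_py entry
        if key = "" then grouped
        else grouped.modify key [] (· ++ [entry]))
      d
    = ((l.filter (fun e => !(decide (tag_entry_key_py e = "")))).map
        (fun e => (tag_entry_key_py e, e))).foldl
        (fun d p => d.modify p.1 [] (· ++ [p.2])) d := by
  induction l generalizing d with
  | nil => rfl
  | cons e t ih =>
      simp only [List.foldl_cons, List.filter_cons]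
      by_cases h : tag_entry_key_py e = ""
      · simp [h, ih]
      · simp [h, ih]

-- ===== VERDICT (by name: the statement is the Claim_ definition above) =====
theorem group_tag_entries_py_spec : Claim_equal_group_tag_entries_py := by
  intro te _
  unfold Spec_group_tag_entries_py group_tag_entries_py group_tag_entries_py_alt
  rw [foldA_eq_pair_fold, pairs_eq_filter_map]
  set L := ((te.getD []).filter (fun e => !(decide (tag_entry_key_py e = "")))).map
      (fun e => (tag_entry_key_py e, e)) with hL
  have hkeys : ((L.foldl (fun d p => d.modify p.1 [] (· ++ [p.2])) PySem.Dict.empty)).keys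
      = PySem.Set.ofList (L.map (·.1)) := by
    rw [PySem.Dict.keys_foldl_modify_key]
    simp [PySem.Dict.keys_empty, PySem.Set.update_nil_left]
  have hnd : ((L.foldl (fun d p => d.modify p.1 [] (· ++ [p.2])) PySem.Dict.empty)).keys.Nodup := by
    rw [hkeys]; exact PySem.Set.nodup_ofList _
  rw [PySem.Dict.items_eq_map_keys _ hnd [], hkeys]
  simp only [PySem.List.dedup_eq_ofList, List.nil_append]
  refine List.map_congr_left ?_
  intro k hk
  congr 1
  rw [PySem.Dict.getD_foldl_modify_append]
  simp [PySem.Dict.getD_empty]
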